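-- pv_equiv track=rewrite | github.com/parvyyy/leetcode | daily/01/grid_game.py | gridGamePS
-- ===== SOURCE A (Python) =====
-- import math
--
-- def gridGamePS(grid: list[list[int]]) -> int:
--     n_r = len(grid[0])
--     ps_1, ps_2 = [0] * n_r, [0] * n_r
--
--     # Prefix sum of the first row.
--     for i in range(n_r):
--         if i == 0:
--             ps_1[i] = grid[0][i]
--             continue
--
--         ps_1[i] = grid[0][i] + ps_1[i - 1]
--
--     # Postfix sum of the second row.
--     for i in range(n_r):
--         i = n_r - i - 1
--
--         if i == n_r - 1:
--             ps_2[i] = grid[1][i]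
--             continue
--
--         ps_2[i] = grid[1][i] + ps_2[i + 1]
--
--     # Compare the top and bottom path, split by the transition 'down' at i.
--     # Find where the maximum of the top & bottom path [as this is the one which
--     # Robot 2 will optimally take] is the minimum!
--     minn = math.inf
--     for i in range(n_r):
--         l = ps_2[0] - ps_2[i]
--         r = ps_1[n_r - 1] - ps_1[i]
--
--         minn = min(max(l, r), minn)
--
--     return minn
-- ===== SOURCE B (Python) =====
-- import math
--
-- def gridGamePS(grid: list[list[int]]) -> int:
--     # Explicit-stack, back-to-front evaluation: a forward push phase records each
--     # column together with the bottom-row prefix before it; the LIFO unwind then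
--     # accumulates the top-row suffix and the running minimum from right to left.
--     stack = []
--     below = 0
--     for a, b in zip(grid[0], grid[1]):
--         stack.append((a, below))
--         below += b
--     top = 0
--     best = math.inf
--     while stack:
--         a, below = stack.pop()
--         best = min(best, max(top, below))
--         top += a
--     return best
-- ===== Notes on version B (the rewrite author's own statement) =====
-- stated objective: alternative
-- what changed: Replaces the two materialized prefix/postfix sum arrays and three forward index loops by an explicit stack: a push phase records each column with the bottom-row prefix before it, then a LIFO unwind evaluates the splits back-to-front, accumulating the top-row suffix and the minimum right-to-left.
-- outside the precondition, e.g. on gridGamePS([[]]): A returns inf, B raises IndexError; on gridGamePS([[], []]): A returns inf, B returns inf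
import Mathlib
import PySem

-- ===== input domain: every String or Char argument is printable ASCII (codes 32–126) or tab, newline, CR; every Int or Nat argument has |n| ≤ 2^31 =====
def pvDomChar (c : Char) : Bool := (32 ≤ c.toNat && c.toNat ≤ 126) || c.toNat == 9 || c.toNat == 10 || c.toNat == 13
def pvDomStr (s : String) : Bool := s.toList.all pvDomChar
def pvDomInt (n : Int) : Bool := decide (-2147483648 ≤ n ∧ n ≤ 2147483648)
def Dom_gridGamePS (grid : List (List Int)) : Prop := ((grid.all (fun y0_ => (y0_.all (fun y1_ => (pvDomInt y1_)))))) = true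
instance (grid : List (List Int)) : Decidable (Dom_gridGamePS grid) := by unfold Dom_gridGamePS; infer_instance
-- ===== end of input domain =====

-- B replaces A's two prefix/postfix sum arrays and three forward index loops by an
-- explicit stack: a push phase records each column with the bottom-row prefix before it,
-- then a LIFO unwind evaluates the splits back-to-front (objective: alternative).


-- ===== PORT A =====
def gridGamePS (grid : List (List Int)) : Int :=
  let row0 := (PySem.List.pyGet? grid 0).getD []   -- grid[0]; none (IndexError on empty grid) is excluded by Pre_
  let nr : Int := PySem.List.len row0
  -- Prefix sum of the first row.
  let ps1 := (PySem.List.pyRange 0 nr 1).foldl (fun ps i =>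
      if i = 0 then PySem.List.pySetD ps i (PySem.List.pyGetD row0 i 0)
      else PySem.List.pySetD ps i (PySem.List.pyGetD row0 i 0 + PySem.List.pyGetD ps (i - 1) 0))
    (List.replicate nr.toNat 0)
  let row1 := (PySem.List.pyGet? grid 1).getD []   -- grid[1]; only read when nr > 0; missing row (IndexError) excluded by Pre_
  -- Postfix sum of the second row.
  let ps2 := (PySem.List.pyRange 0 nr 1).foldl (fun ps i0 =>
      let i := nr - i0 - 1
      if i = nr - 1 then PySem.List.pySetD ps i (PySem.List.pyGetD row1 i 0)
      else PySem.List.pySetD ps i (PySem.List.pyGetD row1 i 0 + PySem.List.pyGetD ps (i + 1) 0))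
    (List.replicate nr.toNat 0)
  -- minn = math.inf, modelled as (none : Option Int); min(x, inf) = x.
  let minn := (PySem.List.pyRange 0 nr 1).foldl (fun (minn : Option Int) i =>
      let l := PySem.List.pyGetD ps2 0 0 - PySem.List.pyGetD ps2 i 0
      let r := PySem.List.pyGetD ps1 (nr - 1) 0 - PySem.List.pyGetD ps1 i 0
      some (match minn with | none => max l r | some m => min (max l r) m))
    (none : Option Int)
  minn.getD 0   -- none only when nr = 0, where Python returns math.inf (a float, not an int) — excluded by Pre_

-- ===== PORT B =====
def gridGamePS_alt (grid : List (List Int)) : Int :=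
  let row0 := (PySem.List.pyGet? grid 0).getD []   -- grid[0]
  let row1 := (PySem.List.pyGet? grid 1).getD []   -- grid[1]
  -- push phase: stack of (a, bottom prefix before this column); head of the list = top of the stack
  let fwd := (List.zip row0 row1).foldl
    (fun (s : List (Int × Int) × Int) ab => ((ab.1, s.2) :: s.1, s.2 + ab.2))
    ([], 0)
  -- LIFO unwind: pop each column, take the candidate, then add its top-row cell to the suffix
  let bwd := fwd.1.foldl
    (fun (s : Int × Option Int) abp =>
      (s.1 + abp.1,
        match s.2 with
        | none => some (max s.1 abp.2)
        | some m => some (min m (max s.1 abp.2))))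
    (0, (none : Option Int))
  bwd.2.getD 0   -- none only for zero columns (math.inf in Python) — excluded by Pre_

-- ===== PRECONDITION & SPEC =====
-- Pre_ excludes (a) grids on which A raises IndexError (no first row; a nonempty first row but
-- no or too short a second row) and (b) grids whose first row is empty, where A returns math.inf,
-- a float and hence no value of the declared int type.
def Pre_gridGamePS (grid : List (List Int)) : Prop :=
  2 ≤ grid.length ∧ grid.getD 0 [] ≠ [] ∧ (grid.getD 0 []).length ≤ (grid.getD 1 []).length
instance (grid : List (List Int)) : Decidable (Pre_gridGamePS grid) := by
  unfold Pre_gridGamePS; infer_instance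
def pvWitness_gridGamePS : List (List Int) := [[2, 5, 4], [1, 5, 1]]

def Spec_gridGamePS (grid : List (List Int)) (out : Int) : Prop := out = gridGamePS_alt grid
instance (grid : List (List Int)) (out : Int) : Decidable (Spec_gridGamePS grid out) := by unfold Spec_gridGamePS; infer_instance

-- ===== CLAIM (what is proved, stated in full; the proofs are below) =====
def Claim_equal_gridGamePS : Prop := ∀ (grid : List (List Int)), Dom_gridGamePS grid → Pre_gridGamePS grid → Spec_gridGamePS grid (gridGamePS grid)

-- ===== LEMMAS AND PROOFS =====

-- Option-minimum accumulation (none = math.inf).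
def omin2 (o : Option Int) (v : Int) : Option Int := some (match o with | none => v | some m => min m v)

-- The stack built by B's push phase, in push order (before reversal into pop order).
def stk : List (Int × Int) → Int → List (Int × Int)
  | [], _ => []
  | (a, b) :: r, bp => (a, bp) :: stk r (bp + b)

-- The candidate values taken by B's unwind loop, in pop order.
def cB : List (Int × Int) → Int → List Int
  | [], _ => []
  | (a, bp) :: r, t => max t bp :: cB r (t + a)

-- The candidates in column order (index 0 first), as the unwind eventually sees them reversed.
def cvt : List (Int × Int) → Int → Int → List Int
  | [], _, _ => []
  | (_, b) :: r, bp, t => max (t + (r.map Prod.fst).sum) bp :: cvt r (bp + b) t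

theorem fwd_spec (l : List (Int × Int)) : ∀ (st : List (Int × Int)) (bp : Int),
    (l.foldl (fun (s : List (Int × Int) × Int) ab => ((ab.1, s.2) :: s.1, s.2 + ab.2)) (st, bp)).1
      = (stk l bp).reverse ++ st := by
  induction l with
  | nil => intro st bp; simp [stk]
  | cons ab r ih =>
    intro st bp
    obtain ⟨a, b⟩ := ab
    simp only [List.foldl_cons, stk, List.reverse_cons]
    rw [ih]
    simp

theorem bwd_spec (m : List (Int × Int)) : ∀ (t : Int) (o : Option Int),
    (m.foldl (fun (s : Int × Option Int) abp =>
        (s.1 + abp.1,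
          match s.2 with
          | none => some (max s.1 abp.2)
          | some mm => some (min mm (max s.1 abp.2)))) (t, o)).2
      = (cB m t).foldl omin2 o := by
  induction m with
  | nil => intro t o; rfl
  | cons abp r ih =>
    intro t o
    obtain ⟨a, bp⟩ := abp
    simp only [List.foldl_cons, cB]
    rw [← ih]
    cases o <;> rfl

theorem cB_append (m1 m2 : List (Int × Int)) : ∀ (t : Int),
    cB (m1 ++ m2) t = cB m1 t ++ cB m2 (t + (m1.map Prod.fst).sum) := by
  induction m1 with
  | nil => intro t; simp [cB]
  | cons abp r ih =>
    intro t
    obtain ⟨a, bp⟩ := abp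
    simp only [List.cons_append, cB, ih, List.map_cons, List.sum_cons]
    rw [show t + (a + (r.map Prod.fst).sum) = t + a + (r.map Prod.fst).sum by ring]

theorem stk_fst (l : List (Int × Int)) : ∀ (bp : Int), (stk l bp).map Prod.fst = l.map Prod.fst := by
  induction l with
  | nil => intro bp; rfl
  | cons ab r ih =>
    intro bp
    obtain ⟨a, b⟩ := ab
    simp [stk, ih]

theorem cB_rev_stk (l : List (Int × Int)) : ∀ (bp t : Int),
    cB ((stk l bp).reverse) t = (cvt l bp t).reverse := by
  induction l with
  | nil => intro bp t; rfl
  | cons ab r ih =>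
    intro bp t
    obtain ⟨a, b⟩ := ab
    simp only [stk, List.reverse_cons, cvt]
    rw [cB_append, ih]
    simp only [cB, List.map_reverse, List.sum_reverse, stk_fst]

theorem cvt_zip (xs : List Int) : ∀ (ys : List Int) (bp t : Int), xs.length ≤ ys.length →
    cvt (xs.zip ys) bp t
      = (List.range xs.length).map
          (fun i => max (t + (xs.drop (i + 1)).sum) (bp + (ys.take i).sum)) := by
  induction xs with
  | nil => intro ys bp t _; simp [cvt]
  | cons x xs ih =>
    intro ys bp t hlen
    cases ys with
    | nil => simp at hlen
    | cons y ys =>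
      have hlen' : xs.length ≤ ys.length := by simpa using hlen
      simp only [List.zip_cons_cons, cvt, List.length_cons, List.range_succ_eq_map,
        List.map_cons, List.map_map]
      congr 1
      · rw [List.map_fst_zip hlen']
        simp
      · rw [ih ys (bp + y) t hlen']
        apply List.map_congr_left
        intro i _
        simp only [Function.comp, Nat.succ_eq_add_one, List.drop_succ_cons, List.take_succ_cons,
          List.sum_cons]
        congr 1
        ring


-- ===== A-side loop characterisations =====

-- First loop of A: prefix sums of the first row.
theorem ps1_eq (r0 : List Int) : ∀ (k : Nat), k ≤ r0.length →
    ((List.range k).map (fun (j : Nat) => (j : Int))).foldl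
      (fun ps i => if i = 0 then PySem.List.pySetD ps i (PySem.List.pyGetD r0 i 0)
        else PySem.List.pySetD ps i (PySem.List.pyGetD r0 i 0 + PySem.List.pyGetD ps (i - 1) 0))
      (List.replicate r0.length 0)
    = (List.range r0.length).map (fun j => if j < k then (r0.take (j + 1)).sum else 0) := by
  intro k
  induction k with
  | zero =>
    intro _
    simp only [List.range_zero, List.map_nil, List.foldl_nil]
    apply List.ext_getElem
    · simp
    · intro j hj1 hj2; simp
  | succ k ih =>
    intro hk
    have hklt : k < r0.length := by omega
    rw [List.range_succ, List.map_append, List.foldl_append, ih (by omega)]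
    simp only [List.map_cons, List.map_nil, List.foldl_cons, List.foldl_nil]
    have key : ∀ (v : Int), v = (r0.take (k + 1)).sum →
        ((List.range r0.length).map (fun j => if j < k then (r0.take (j + 1)).sum else 0)).set k v
        = (List.range r0.length).map (fun j => if j < k + 1 then (r0.take (j + 1)).sum else 0) := by
      intro v hv
      apply List.ext_getElem
      · simp
      · intro j hj1 hj2
        simp only [List.getElem_set, List.getElem_map, List.getElem_range]
        by_cases hjk : k = j
        · subst hjk; simp [hv]
        · rw [if_neg hjk, if_congr (by omega : (j < k) ↔ (j < k + 1)) rfl rfl]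
    by_cases hk0 : ((k : Nat) : Int) = 0
    · have hk0' : k = 0 := by exact_mod_cast hk0
      subst hk0'
      rw [if_pos hk0, PySem.List.pySetD_natCast, PySem.List.pyGetD_natCast]
      apply key
      rw [List.getD_eq_getElem r0 0 hklt, List.sum_take_succ r0 0 hklt]
      simp
    · have hk1 : 1 ≤ k := by
        rcases Nat.eq_zero_or_pos k with h | h
        · exact absurd (by simp [h]) hk0
        · omega
      have hc : ((k : Int) - 1) = (((k - 1 : Nat) : Nat) : Int) := by omega
      rw [if_neg hk0, hc, PySem.List.pySetD_natCast, PySem.List.pyGetD_natCast,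
        PySem.List.pyGetD_natCast, PySem.List.getD_map_range _ _ _ _ (by omega)]
      apply key
      rw [if_pos (by omega : k - 1 < k), List.getD_eq_getElem r0 0 hklt,
        List.sum_take_succ r0 k hklt, Nat.sub_add_cancel hk1]
      ring

-- Second loop of A: postfix sums of the second row (first n = len(grid[0]) cells).
theorem ps2_eq (r1 : List Int) (n : Nat) (hn : n ≤ r1.length) : ∀ (k : Nat), k ≤ n →
    ((List.range k).map (fun (j : Nat) => (j : Int))).foldl
      (fun ps i0 =>
        if (n : Int) - i0 - 1 = (n : Int) - 1 then
          PySem.List.pySetD ps ((n : Int) - i0 - 1) (PySem.List.pyGetD r1 ((n : Int) - i0 - 1) 0)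
        else
          PySem.List.pySetD ps ((n : Int) - i0 - 1)
            (PySem.List.pyGetD r1 ((n : Int) - i0 - 1) 0 + PySem.List.pyGetD ps ((n : Int) - i0 - 1 + 1) 0))
      (List.replicate n 0)
    = (List.range n).map (fun j => if n - k ≤ j then ((r1.take n).drop j).sum else 0) := by
  intro k
  induction k with
  | zero =>
    intro _
    simp only [List.range_zero, List.map_nil, List.foldl_nil]
    apply List.ext_getElem
    · simp
    · intro j hj1 hj2
      simp only [List.length_replicate] at hj1
      simp only [List.getElem_replicate, List.getElem_map, List.getElem_range]
      rw [if_neg (by omega)]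
  | succ k ih =>
    intro hk
    have hklt : k < n := by omega
    rw [List.range_succ, List.map_append, List.foldl_append, ih (by omega)]
    simp only [List.map_cons, List.map_nil, List.foldl_cons, List.foldl_nil]
    have hidx : ((n : Int) - (k : Nat) - 1) = (((n - k - 1 : Nat) : Nat) : Int) := by omega
    have hlt1 : n - k - 1 < n := by omega
    have hlt1' : n - k - 1 < r1.length := by omega
    have key : ∀ (v : Int), v = ((r1.take n).drop (n - k - 1)).sum →
        ((List.range n).map (fun j => if n - k ≤ j then ((r1.take n).drop j).sum else 0)).set (n - k - 1) v
        = (List.range n).map (fun j => if n - (k + 1) ≤ j then ((r1.take n).drop j).sum else 0) := by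
      intro v hv
      apply List.ext_getElem
      · simp
      · intro j hj1 hj2
        simp only [List.getElem_set, List.getElem_map, List.getElem_range]
        by_cases hjk : n - k - 1 = j
        · subst hjk; rw [if_pos rfl, if_pos (by omega), hv]
        · rw [if_neg hjk, if_congr (by omega : (n - k ≤ j) ↔ (n - (k + 1) ≤ j)) rfl rfl]
    have hdrop : ((r1.take n).drop (n - k - 1)).sum
        = r1[n - k - 1]'hlt1' + ((r1.take n).drop (n - k - 1 + 1)).sum := by
      rw [List.drop_eq_getElem_cons
        (by simp only [List.length_take]; omega : n - k - 1 < (r1.take n).length)]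
      simp [List.getElem_take]
    by_cases hk0 : ((n : Int) - (k : Nat) - 1) = ((n : Int) - 1)
    · -- k = 0 : the last cell, grid[1][n-1]
      have hk0' : k = 0 := by omega
      subst hk0'
      rw [if_pos hk0, hidx, PySem.List.pySetD_natCast, PySem.List.pyGetD_natCast]
      apply key
      rw [hdrop, List.drop_eq_nil_of_le (by simp only [List.length_take]; omega),
        List.getD_eq_getElem r1 0 hlt1']
      simp
    · have hk1 : 1 ≤ k := by omega
      have hc : (((n - k - 1 : Nat) : Int) + 1) = (((n - k : Nat) : Nat) : Int) := by omega
      rw [if_neg hk0, hidx, PySem.List.pySetD_natCast, PySem.List.pyGetD_natCast, hc,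
        PySem.List.pyGetD_natCast, PySem.List.getD_map_range _ _ _ _ (by omega)]
      apply key
      rw [if_pos (le_refl (n - k)), List.getD_eq_getElem r1 0 hlt1', hdrop,
        (by omega : n - k - 1 + 1 = n - k)]

-- The omin2-fold is insensitive to reversal (min is commutative with identity none).
theorem omin2_swap (l : List Int) : ∀ (o : Option Int) (v : Int),
    l.foldl omin2 (omin2 o v) = omin2 (l.foldl omin2 o) v := by
  induction l with
  | nil => intro o v; rfl
  | cons x r ih =>
    intro o v
    simp only [List.foldl_cons]
    rw [← ih]
    have hcomm : omin2 (omin2 o v) x = omin2 (omin2 o x) v := by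
      cases o <;> simp only [omin2] <;> congr 1 <;> omega
    rw [hcomm]

theorem foldl_omin2_reverse (l : List Int) : ∀ (o : Option Int),
    l.reverse.foldl omin2 o = l.foldl omin2 o := by
  induction l with
  | nil => intro o; rfl
  | cons x r ih =>
    intro o
    simp only [List.reverse_cons, List.foldl_append, List.foldl_cons, List.foldl_nil, ih]
    rw [← omin2_swap]

-- The option-min folds of the two ports agree when the per-index values agree.
theorem foldl_opt_congr (f g : Nat → Int) : ∀ (n : Nat), (∀ j < n, f j = g j) → ∀ (o : Option Int),
    (List.range n).foldl (fun o j => some (match o with | none => f j | some m => min (f j) m)) o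
    = (List.range n).foldl (fun o j => some (match o with | none => g j | some m => min m (g j))) o := by
  intro n
  induction n with
  | zero => intro _ o; rfl
  | succ n ih =>
    intro h o
    rw [List.range_succ, List.foldl_append, List.foldl_append, ih (fun j hj => h j (by omega)) o]
    simp only [List.foldl_cons, List.foldl_nil]
    cases (List.range n).foldl
        (fun o j => some (match o with | none => g j | some m => min m (g j))) o with
    | none => simp [h n (by omega)]
    | some m => simp [h n (by omega), min_comm]

theorem gridGamePS_spec : Claim_equal_gridGamePS := by
  intro grid _ hpre
  obtain ⟨h2, hne, hle⟩ := hpre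
  match grid, h2 with
  | r0 :: r1 :: rest, _ =>
  simp only [List.getD_cons_zero, List.getD_cons_succ] at hne hle
  have hget0 : PySem.List.pyGet? (r0 :: r1 :: rest) 0 = some r0 := by
    simp [PySem.List.pyGet?_zero_cons]
  have hget1 : PySem.List.pyGet? (r0 :: r1 :: rest) 1 = some r1 := by
    rw [show (1 : Int) = ((1 : Nat) : Int) by norm_num,
      PySem.List.pyGet?_ofNat _ 1 (by simp)]
    simp
  have hn1 : 1 ≤ r0.length := List.length_pos_iff.mpr hne
  show gridGamePS _ = gridGamePS_alt _
  unfold gridGamePS gridGamePS_alt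
  simp only [hget0, hget1, Option.getD_some, PySem.List.len_eq, Int.toNat_natCast,
    PySem.List.pyRange_zero_natCast]
  rw [ps1_eq r0 r0.length le_rfl, ps2_eq r1 r0.length hle r0.length le_rfl]
  -- reduce B to a fold over the candidates in column order
  have hfwd := fwd_spec (r0.zip r1) [] 0
  rw [show ((r0.zip r1).foldl (fun (s : List (Int × Int) × Int) ab => ((ab.1, s.2) :: s.1, s.2 + ab.2)) ([], 0)).1
      = (stk (r0.zip r1) 0).reverse by simpa using hfwd]
  rw [bwd_spec, cB_rev_stk, foldl_omin2_reverse, cvt_zip r0 r1 0 0 hle]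
  simp only [List.foldl_map, omin2]
  refine congrArg (fun o : Option Int => o.getD 0)
    (foldl_opt_congr _ _ r0.length ?_ none)
  intro j hj
  have e0 : PySem.List.pyGetD
      ((List.range r0.length).map (fun j => if r0.length - r0.length ≤ j then ((r1.take r0.length).drop j).sum else 0)) 0 0
      = (r1.take r0.length).sum := by
    rw [PySem.List.pyGetD_zero, List.getD_eq_getElem _ _ (by simp; omega)]
    simp
  have e2 : PySem.List.pyGetD
      ((List.range r0.length).map (fun j => if r0.length - r0.length ≤ j then ((r1.take r0.length).drop j).sum else 0)) (j : Int) 0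
      = ((r1.take r0.length).drop j).sum := by
    rw [PySem.List.pyGetD_natCast, PySem.List.getD_map_range _ _ _ _ hj]
    simp
  have e3 : PySem.List.pyGetD
      ((List.range r0.length).map (fun j => if j < r0.length then (r0.take (j + 1)).sum else 0)) ((r0.length : Int) - 1) 0
      = r0.sum := by
    rw [show ((r0.length : Int) - 1) = ((r0.length - 1 : Nat) : Int) by omega,
      PySem.List.pyGetD_natCast, PySem.List.getD_map_range _ _ _ _ (by omega)]
    rw [if_pos (by omega), Nat.sub_add_cancel hn1, List.take_length]
  have e4 : PySem.List.pyGetD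
      ((List.range r0.length).map (fun j => if j < r0.length then (r0.take (j + 1)).sum else 0)) (j : Int) 0
      = (r0.take (j + 1)).sum := by
    rw [PySem.List.pyGetD_natCast, PySem.List.getD_map_range _ _ _ _ hj]
    rw [if_pos hj]
  rw [e0, e2, e3, e4]
  have hsplit1 := List.sum_take_add_sum_drop (r1.take r0.length) j
  have htt : (r1.take r0.length).take j = r1.take j := by
    rw [List.take_take, Nat.min_eq_left (by omega)]
  rw [htt] at hsplit1
  have hb : (r1.take r0.length).sum - ((r1.take r0.length).drop j).sum = (r1.take j).sum := by omega
  have hsplit0 := List.sum_take_add_sum_drop r0 (j + 1)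
  have ht : r0.sum - (r0.take (j + 1)).sum = (r0.drop (j + 1)).sum := by omega
  rw [hb, ht, zero_add, zero_add, max_comm]
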